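-- pv_equiv track=rewrite | github.com/sealmindset/auditbamgh | src/api/utils/diagram_executor.py | find_correct_import
-- ===== SOURCE A (Python) =====
-- from typing import Optional, Dict, Tuple, List, Any
--
-- def find_correct_import(
--     class_name: str,
--     diagrams_index: Dict[str, str],
--     context_hint: Optional[str] = None
-- ) -> Optional[str]:
--     """
--     Find the correct import path for a class name.
--     Uses context hint to prefer certain providers (aws, azure, gcp, onprem).
--     """
--     if class_name in diagrams_index:
--         return diagrams_index[class_name]
--
--     # Try case-insensitive search
--     for name, path in diagrams_index.items():
--         if name.lower() == class_name.lower():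
--             return path
--
--     # Try partial match for common patterns
--     partial_matches = []
--     for name, path in diagrams_index.items():
--         if class_name.lower() in name.lower():
--             partial_matches.append((name, path))
--
--     if partial_matches:
--         # If we have a context hint, prefer matches from that provider
--         if context_hint:
--             for name, path in partial_matches:
--                 if context_hint.lower() in path.lower():
--                     return path
--         # Otherwise return first match
--         return partial_matches[0][1]
--
--     return None
-- ===== SOURCE B (Python) =====
-- def find_correct_import(class_name, diagrams_index, context_hint=None):
--     """Rank-and-minimize: score every entry once (0 exact, 1 case-insensitive
--     equal, 2 partial with provider hint in path, 3 plain partial, None no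
--     match) and return the path of the first minimum-rank candidate via min()."""
--     target = class_name.lower()
--     hint = context_hint.lower() if context_hint else None
--
--     def rank(name, path):
--         if target not in name.lower():
--             return None
--         if name == class_name:
--             return 0
--         if name.lower() == target:
--             return 1
--         if hint is not None and hint in path.lower():
--             return 2
--         return 3
--
--     candidates = [(r, p) for n, p in diagrams_index.items()
--                   if (r := rank(n, p)) is not None]
--     if not candidates:
--         return None
--     return min(candidates, key=lambda t: t[0])[1]
-- ===== Notes on version B (the rewrite author's own statement) =====
-- stated objective: faster
-- what changed: Replaces A's cascade of sequential scans (exact key, case-insensitive scan, partial collect, hint rescan) by a rank-and-minimize algorithm: each entry is scored once with a single numeric priority (0 exact, 1 case-insensitive equal, 2 hinted partial, 3 plain partial) and the answer is the first minimum-rank candidate of one min() pass; the query (and hint) are lowercased once instead of once per entry per scan.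
import Mathlib
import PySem

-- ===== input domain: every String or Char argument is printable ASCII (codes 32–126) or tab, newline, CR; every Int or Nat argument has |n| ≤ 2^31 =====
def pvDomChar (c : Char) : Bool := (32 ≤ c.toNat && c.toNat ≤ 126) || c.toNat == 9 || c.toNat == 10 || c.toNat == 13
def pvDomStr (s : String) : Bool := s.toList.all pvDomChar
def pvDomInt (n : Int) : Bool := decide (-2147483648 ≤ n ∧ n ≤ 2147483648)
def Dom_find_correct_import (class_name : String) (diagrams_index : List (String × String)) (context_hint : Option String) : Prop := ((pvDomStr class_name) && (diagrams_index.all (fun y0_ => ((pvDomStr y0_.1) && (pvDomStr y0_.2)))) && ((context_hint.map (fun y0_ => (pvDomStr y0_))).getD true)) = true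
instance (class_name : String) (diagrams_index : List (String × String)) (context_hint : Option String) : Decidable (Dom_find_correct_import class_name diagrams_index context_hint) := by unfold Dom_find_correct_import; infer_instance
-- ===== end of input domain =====

-- B replaces A's cascade of scans by a rank-and-minimize pass: score each entry once (0 exact, 1 ci-equal, 2 hinted partial, 3 partial), lowercasing the query once, and take the first minimum-rank candidate (objective: faster, measured constant-factor speedup).


-- ===== PORT A =====
def find_correct_import (class_name : String) (diagrams_index : List (String × String)) (context_hint : Option String) : Option String :=
  match (PySem.Dict.mk diagrams_index).get? class_name with
  | some p => some p
  | none =>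
    -- for name, path in ...: if name.lower() == class_name.lower(): return path
    match diagrams_index.find? (fun nv => PySem.Str.lower nv.1 == PySem.Str.lower class_name) with
    | some nv => some nv.2
    | none =>
      -- partial_matches built by an append loop
      let partial_matches := diagrams_index.foldl
        (fun acc nv => if PySem.Str.isIn (PySem.Str.lower class_name) (PySem.Str.lower nv.1) then acc ++ [nv] else acc) []
      match partial_matches with
      | [] => none
      | (_, p0) :: _ =>
        match context_hint with
        | some h =>
          if h ≠ "" then  -- Python truthiness of the hint
            match partial_matches.find? (fun nv => PySem.Str.isIn (PySem.Str.lower h) (PySem.Str.lower nv.2)) with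
            | some nv => some nv.2
            | none => some p0
          else some p0
        | none => some p0

-- ===== PORT B =====
-- rank(name, path): None if no partial match, else 0 exact / 1 ci-equal / 2 hinted partial / 3 partial
def fciRank (class_name target : String) (hint : Option String) (nv : String × String) : Option Nat :=
  if PySem.Str.isIn target (PySem.Str.lower nv.1) then
    some (if nv.1 == class_name then 0
          else if PySem.Str.lower nv.1 == target then 1
          else match hint with
               | some h => if PySem.Str.isIn h (PySem.Str.lower nv.2) then 2 else 3
               | none => 3)
  else none

def find_correct_import_alt (class_name : String) (diagrams_index : List (String × String)) (context_hint : Option String) : Option String :=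
  let target := PySem.Str.lower class_name
  let hint : Option String := match context_hint with
    | some h => if h ≠ "" then some (PySem.Str.lower h) else none   -- Python truthiness
    | none => none
  -- candidates = [(rank(n,p), p) ...] comprehension
  let candidates := diagrams_index.filterMap
    (fun nv => (fciRank class_name target hint nv).map (fun r => (r, nv.2)))
  -- min(candidates, key=lambda t: t[0]): first element of minimal rank (Python min keeps the first on ties)
  match candidates with
  | [] => none
  | c :: cs => some (cs.foldl (fun best t => if t.1 < best.1 then t else best) c).2

-- ===== PRECONDITION & SPEC =====
def Spec_find_correct_import (class_name : String) (diagrams_index : List (String × String)) (context_hint : Option String) (out : Option String) : Prop := out = find_correct_import_alt class_name diagrams_index context_hint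
instance (class_name : String) (diagrams_index : List (String × String)) (context_hint : Option String) (out : Option String) : Decidable (Spec_find_correct_import class_name diagrams_index context_hint out) := by unfold Spec_find_correct_import; infer_instance

-- ===== CLAIM (what is proved, stated in full; the proofs are below) =====
def Claim_equal_find_correct_import : Prop := ∀ (class_name : String) (diagrams_index : List (String × String)) (context_hint : Option String), Dom_find_correct_import class_name diagrams_index context_hint → Spec_find_correct_import class_name diagrams_index context_hint (find_correct_import class_name diagrams_index context_hint)

-- ===== LEMMAS AND PROOFS =====

-- right-recursive "first minimum" picker, used only to reason about B's foldl
def fciPick : List (Nat × String) → Option (Nat × String)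
  | [] => none
  | c :: cs => match fciPick cs with
    | none => some c
    | some t => some (if t.1 < c.1 then t else c)

-- the priority cascade the first-minimum pick amounts to (ranks bounded by 3)
def fciCasc (l : List (Nat × String)) : Option (Nat × String) :=
  match l.find? (fun t => t.1 == 0) with
  | some t => some t
  | none => match l.find? (fun t => t.1 == 1) with
    | some t => some t
    | none => match l.find? (fun t => t.1 == 2) with
      | some t => some t
      | none => l.find? (fun t => t.1 == 3)

def fciHint (context_hint : Option String) : Option String :=
  match context_hint with
  | some h => if h ≠ "" then some (PySem.Str.lower h) else none
  | none => none

def fciG (class_name : String) (hint : Option String) (nv : String × String) : Option (Nat × String) :=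
  (fciRank class_name (PySem.Str.lower class_name) hint nv).map (fun r => (r, nv.2))

lemma fci_foldl_eq_pick (l : List (Nat × String)) (b : Nat × String) :
    some (l.foldl (fun best t => if t.1 < best.1 then t else best) b) = fciPick (b :: l) := by
  induction l generalizing b with
  | nil => rfl
  | cons c cs ih =>
    rw [List.foldl_cons, ih]
    show fciPick ((if c.1 < b.1 then c else b) :: cs) = fciPick (b :: c :: cs)
    simp only [fciPick]
    cases h : fciPick cs with
    | none => rfl
    | some t =>
      by_cases h1 : c.1 < b.1 <;> by_cases h2 : t.1 < c.1 <;>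
        simp [h1, h2] <;>
        first
          | rfl
          | rw [if_pos (by omega)]
          | rw [if_neg (by omega)]
          | (intro hcontra; exfalso; omega)

lemma fci_pick_eq_casc (l : List (Nat × String)) (hb : ∀ t ∈ l, t.1 ≤ 3) :
    fciPick l = fciCasc l := by
  induction l with
  | nil => rfl
  | cons c cs ih =>
    have hc : c.1 ≤ 3 := hb c (by simp)
    have ih' := ih (fun t ht => hb t (List.mem_cons_of_mem _ ht))
    simp only [fciPick, ih']
    have h4 : c.1 = 0 ∨ c.1 = 1 ∨ c.1 = 2 ∨ c.1 = 3 := by omega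
    rcases h4 with h | h | h | h
    · -- exact rank at the head: head always wins
      have hcons : fciCasc (c :: cs) = some c := by
        rw [fciCasc, List.find?_cons_of_pos (by simp [h])]
      rw [hcons]
      cases hR : fciCasc cs with
      | none => rfl
      | some t => simp [h]
    · have hcons0 : (c :: cs).find? (fun t => t.1 == 0) = cs.find? (fun t => t.1 == 0) :=
        List.find?_cons_of_neg (by simp [h])
      cases h0 : cs.find? (fun t => t.1 == 0) with
      | some t0 =>
        have ht0 : t0.1 = 0 := by simpa using List.find?_some h0
        have hcs : fciCasc cs = some t0 := by rw [fciCasc, h0]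
        have hcons : fciCasc (c :: cs) = some t0 := by rw [fciCasc, hcons0, h0]
        rw [hcons, hcs]
        simp [h, ht0]
      | none =>
        have hcons : fciCasc (c :: cs) = some c := by
          rw [fciCasc, hcons0, h0, List.find?_cons_of_pos (by simp [h])]
        rw [hcons]
        have hkey : ∀ t, fciCasc cs = some t → 1 ≤ t.1 := by
          intro t ht
          rw [fciCasc, h0] at ht
          rcases h1 : cs.find? (fun t => t.1 == 1) with _ | t1 <;> rw [h1] at ht
          · rcases h2 : cs.find? (fun t => t.1 == 2) with _ | t2 <;> rw [h2] at ht
            · have := List.find?_some ht; simp at this; omega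
            · cases ht; have := List.find?_some h2; simp at this; omega
          · cases ht; have := List.find?_some h1; simp at this; omega
        cases hR : fciCasc cs with
        | none => rfl
        | some t =>
          have hge := hkey t hR
          simp only [h]
          rw [if_neg (by omega)]
    · have hcons0 : (c :: cs).find? (fun t => t.1 == 0) = cs.find? (fun t => t.1 == 0) :=
        List.find?_cons_of_neg (by simp [h])
      have hcons1 : (c :: cs).find? (fun t => t.1 == 1) = cs.find? (fun t => t.1 == 1) :=
        List.find?_cons_of_neg (by simp [h])
      cases h0 : cs.find? (fun t => t.1 == 0) with
      | some t0 =>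
        have ht0 : t0.1 = 0 := by simpa using List.find?_some h0
        have hcs : fciCasc cs = some t0 := by rw [fciCasc, h0]
        have hcons : fciCasc (c :: cs) = some t0 := by rw [fciCasc, hcons0, h0]
        rw [hcons, hcs]; simp [h, ht0]
      | none =>
        cases h1 : cs.find? (fun t => t.1 == 1) with
        | some t1 =>
          have ht1 : t1.1 = 1 := by simpa using List.find?_some h1
          have hcs : fciCasc cs = some t1 := by rw [fciCasc, h0, h1]
          have hcons : fciCasc (c :: cs) = some t1 := by
            rw [fciCasc, hcons0, h0, hcons1, h1]
          rw [hcons, hcs]; simp [h, ht1]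
        | none =>
          have hcons : fciCasc (c :: cs) = some c := by
            rw [fciCasc, hcons0, h0, hcons1, h1, List.find?_cons_of_pos (by simp [h])]
          rw [hcons]
          have hkey : ∀ t, fciCasc cs = some t → 2 ≤ t.1 := by
            intro t ht
            rw [fciCasc, h0, h1] at ht
            rcases h2 : cs.find? (fun t => t.1 == 2) with _ | t2 <;> rw [h2] at ht
            · have := List.find?_some ht; simp at this; omega
            · cases ht; have := List.find?_some h2; simp at this; omega
          cases hR : fciCasc cs with
          | none => rfl
          | some t =>
            have hge := hkey t hR
            simp only [h]
            rw [if_neg (by omega)]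
    · have hcons0 : (c :: cs).find? (fun t => t.1 == 0) = cs.find? (fun t => t.1 == 0) :=
        List.find?_cons_of_neg (by simp [h])
      have hcons1 : (c :: cs).find? (fun t => t.1 == 1) = cs.find? (fun t => t.1 == 1) :=
        List.find?_cons_of_neg (by simp [h])
      have hcons2 : (c :: cs).find? (fun t => t.1 == 2) = cs.find? (fun t => t.1 == 2) :=
        List.find?_cons_of_neg (by simp [h])
      cases h0 : cs.find? (fun t => t.1 == 0) with
      | some t0 =>
        have ht0 : t0.1 = 0 := by simpa using List.find?_some h0
        have hcs : fciCasc cs = some t0 := by rw [fciCasc, h0]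
        have hcons : fciCasc (c :: cs) = some t0 := by rw [fciCasc, hcons0, h0]
        rw [hcons, hcs]; simp [h, ht0]
      | none =>
        cases h1 : cs.find? (fun t => t.1 == 1) with
        | some t1 =>
          have ht1 : t1.1 = 1 := by simpa using List.find?_some h1
          have hcs : fciCasc cs = some t1 := by rw [fciCasc, h0, h1]
          have hcons : fciCasc (c :: cs) = some t1 := by
            rw [fciCasc, hcons0, h0, hcons1, h1]
          rw [hcons, hcs]; simp [h, ht1]
        | none =>
          cases h2 : cs.find? (fun t => t.1 == 2) with
          | some t2 =>
            have ht2 : t2.1 = 2 := by simpa using List.find?_some h2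
            have hcs : fciCasc cs = some t2 := by rw [fciCasc, h0, h1, h2]
            have hcons : fciCasc (c :: cs) = some t2 := by
              rw [fciCasc, hcons0, h0, hcons1, h1, hcons2, h2]
            rw [hcons, hcs]; simp [h, ht2]
          | none =>
            have hcons : fciCasc (c :: cs) = some c := by
              rw [fciCasc, hcons0, h0, hcons1, h1, hcons2, h2,
                List.find?_cons_of_pos (by simp [h])]
            rw [hcons]
            have hkey : ∀ t, fciCasc cs = some t → t.1 = 3 := by
              intro t ht
              rw [fciCasc, h0, h1, h2] at ht
              have := List.find?_some ht; simpa using this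
            cases hR : fciCasc cs with
            | none => rfl
            | some t =>
              have hge := hkey t hR
              simp only [h]
              rw [if_neg (by omega)]

lemma fci_find?_filterMap {α β : Type} (g : α → Option β) (p : β → Bool) (l : List α) :
    (l.filterMap g).find? p = (l.find? (fun x => ((g x).map p).getD false)).bind g := by
  induction l with
  | nil => rfl
  | cons hd tl ih =>
    cases hg : g hd with
    | none => simp [hg, ih]
    | some y =>
      cases hp : p y with
      | true => simp [hg, hp]
      | false => simp [hg, hp, ih]

lemma fci_find?_congr {α : Type} (l : List α) (p q : α → Bool) (h : ∀ x ∈ l, p x = q x) :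
    l.find? p = l.find? q := by
  induction l with
  | nil => rfl
  | cons hd tl ih =>
    have hhd := h hd (by simp)
    rw [List.find?_cons, List.find?_cons, hhd, ih (fun x hx => h x (by simp [hx]))]

lemma fci_find?_filter {α : Type} (l : List α) (p q : α → Bool) :
    (l.filter p).find? q = l.find? (fun x => p x && q x) := by
  induction l with
  | nil => rfl
  | cons hd tl ih =>
    by_cases hp : p hd = true
    · cases hq : q hd <;> simp [List.filter_cons, hp, hq, ih]
    · simp only [Bool.not_eq_true] at hp
      simp [List.filter_cons, hp, ih]

lemma fci_head?_filter {α : Type} (l : List α) (p : α → Bool) :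
    (l.filter p).head? = l.find? p := by
  induction l with
  | nil => rfl
  | cons hd tl ih =>
    cases hp : p hd <;> simp [List.filter_cons, hp, ih]

lemma fci_isIn_self_chars (l : List Char) : PySem.Chars.isIn l l = true := by
  rw [PySem.Chars.isIn_iff_infix]
  try exact List.infix_refl _

lemma fci_get?_eq_find? (cn : String) (di : List (String × String)) :
    (PySem.Dict.mk di).get? cn = (di.find? (fun nv => nv.1 == cn)).map (·.2) := by
  induction di with
  | nil => rfl
  | cons hd tl ih =>
    rw [PySem.Dict.get?_mk_cons]
    by_cases h : hd.1 = cn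
    · simp [h]
    · simp [beq_false_of_ne h, ih]

-- exhaustive shape of a defined rank
lemma fciRank_cases (cn target : String) (hint : Option String) (nv : String × String) (r : Nat)
    (h : fciRank cn target hint nv = some r) :
    (r = 0 ∧ (nv.1 == cn) = true)
    ∨ (r = 1 ∧ (nv.1 == cn) = false ∧ (PySem.Str.lower nv.1 == target) = true)
    ∨ ((r = 2 ∨ r = 3) ∧ (nv.1 == cn) = false ∧ (PySem.Str.lower nv.1 == target) = false) := by
  unfold fciRank at h
  rcases hint with _ | h' <;> split_ifs at h <;> simp_all
  split_ifs at h <;> omega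

lemma fciRank_le (cn target : String) (hint : Option String) (nv : String × String) (r : Nat)
    (h : fciRank cn target hint nv = some r) : r ≤ 3 := by
  rcases fciRank_cases cn target hint nv r h with ⟨h1, _⟩ | ⟨h1, _⟩ | ⟨h1, _⟩ <;> omega

lemma fciRank_ne0 (cn target : String) (hint : Option String) (nv : String × String) (r : Nat)
    (hx : (nv.1 == cn) = false) (h : fciRank cn target hint nv = some r) : (r == 0) = false := by
  rcases fciRank_cases cn target hint nv r h with ⟨_, h2⟩ | ⟨h1, _⟩ | ⟨h1, _⟩ <;> simp_all <;> omega

lemma fciRank_ne1 (cn target : String) (hint : Option String) (nv : String × String) (r : Nat)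
    (hci : (PySem.Str.lower nv.1 == target) = false) (h : fciRank cn target hint nv = some r) :
    (r == 1) = false := by
  rcases fciRank_cases cn target hint nv r h with ⟨h1, h2⟩ | ⟨_, _, h2⟩ | ⟨h1, _⟩ <;> simp_all <;> omega

-- fciRank on the concrete `target = lower cn`, case by case
lemma fciRank_exact (cn : String) (hint : Option String) (nv : String × String)
    (h : nv.1 = cn) : fciRank cn (PySem.Str.lower cn) hint nv = some 0 := by
  subst h
  simp [fciRank, fci_isIn_self_chars]

lemma fciRank_ci (cn : String) (hint : Option String) (nv : String × String)
    (h1 : (nv.1 == cn) = false) (h2 : PySem.Str.lower nv.1 = PySem.Str.lower cn) :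
    fciRank cn (PySem.Str.lower cn) hint nv = some 1 := by
  simp [fciRank, h1, h2, fci_isIn_self_chars]

lemma fciRank_nonpartial (cn : String) (hint : Option String) (nv : String × String)
    (h : PySem.Str.isIn (PySem.Str.lower cn) (PySem.Str.lower nv.1) = false) :
    fciRank cn (PySem.Str.lower cn) hint nv = none := by
  unfold fciRank
  rw [h]
  rfl

lemma fciRank_partial (cn : String) (hint : Option String) (nv : String × String)
    (h1 : (nv.1 == cn) = false)
    (h2 : (PySem.Str.lower nv.1 == PySem.Str.lower cn) = false)
    (h3 : PySem.Str.isIn (PySem.Str.lower cn) (PySem.Str.lower nv.1) = true) :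
    fciRank cn (PySem.Str.lower cn) hint nv
      = some (match hint with
              | some h' => if PySem.Str.isIn h' (PySem.Str.lower nv.2) then 2 else 3
              | none => 3) := by
  unfold fciRank
  rw [h3, h1, h2]
  rfl

-- predicate seen through filterMap for rank k
lemma fciG_pred (cn : String) (hint : Option String) (k : Nat) (nv : String × String) :
    ((fciG cn hint nv).map (fun t => t.1 == k)).getD false
      = ((fciRank cn (PySem.Str.lower cn) hint nv).map (fun r => r == k)).getD false := by
  unfold fciG
  cases fciRank cn (PySem.Str.lower cn) hint nv <;> rfl

lemma fci_alt_eq (cn : String) (di : List (String × String)) (ch : Option String) :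
    find_correct_import_alt cn di ch = (fciCasc (di.filterMap (fciG cn (fciHint ch)))).map (·.2) := by
  show (match di.filterMap (fciG cn (fciHint ch)) with
        | [] => none
        | c :: cs => some (cs.foldl (fun best t => if t.1 < best.1 then t else best) c).2)
      = (fciCasc (di.filterMap (fciG cn (fciHint ch)))).map (·.2)
  cases hc : di.filterMap (fciG cn (fciHint ch)) with
  | nil => rfl
  | cons c cs =>
    have hb : ∀ t ∈ c :: cs, t.1 ≤ 3 := by
      intro t ht
      rw [← hc] at ht
      obtain ⟨nv, _, hnv⟩ := List.mem_filterMap.mp ht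
      unfold fciG at hnv
      cases hr : fciRank cn (PySem.Str.lower cn) (fciHint ch) nv with
      | none => rw [hr] at hnv; cases hnv
      | some r =>
        rw [hr] at hnv
        cases hnv
        exact fciRank_le _ _ _ _ _ hr
    have hfold := fci_foldl_eq_pick cs c
    rw [fci_pick_eq_casc _ hb] at hfold
    cases hR : fciCasc (c :: cs) with
    | none => rw [hR] at hfold; cases hfold
    | some t =>
      rw [hR] at hfold
      simp only [Option.some.injEq] at hfold
      simp [hfold]

-- A with the `partial_matches` let zeta-expanded (definitionally equal, proved by rfl)
def fciA (class_name : String) (diagrams_index : List (String × String)) (context_hint : Option String) : Option String :=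
  match (PySem.Dict.mk diagrams_index).get? class_name with
  | some p => some p
  | none =>
    match diagrams_index.find? (fun nv => PySem.Str.lower nv.1 == PySem.Str.lower class_name) with
    | some nv => some nv.2
    | none =>
      match diagrams_index.foldl
        (fun acc nv => if PySem.Str.isIn (PySem.Str.lower class_name) (PySem.Str.lower nv.1) then acc ++ [nv] else acc) [] with
      | [] => none
      | (_, p0) :: _ =>
        match context_hint with
        | some h =>
          if h ≠ "" then
            match (diagrams_index.foldl
                (fun acc nv => if PySem.Str.isIn (PySem.Str.lower class_name) (PySem.Str.lower nv.1) then acc ++ [nv] else acc) []).find?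
                (fun nv => PySem.Str.isIn (PySem.Str.lower h) (PySem.Str.lower nv.2)) with
            | some nv => some nv.2
            | none => some p0
          else some p0
        | none => some p0

lemma fci_A_eq (cn : String) (di : List (String × String)) (ch : Option String) :
    find_correct_import cn di ch = fciA cn di ch := rfl

-- the main equivalence
lemma fci_main (cn : String) (di : List (String × String)) (ch : Option String) :
    find_correct_import cn di ch = find_correct_import_alt cn di ch := by
  rw [fci_alt_eq, fci_A_eq]
  unfold fciA
  rw [fci_get?_eq_find? cn di]
  set hint := fciHint ch with hhint
  set g := fciG cn hint with hg
  -- the four cascade finds, pushed through filterMap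
  have hfm : ∀ k : Nat, (di.filterMap g).find? (fun t => t.1 == k)
      = (di.find? (fun nv => ((fciRank cn (PySem.Str.lower cn) hint nv).map (fun r => r == k)).getD false)).bind g := by
    intro k
    rw [fci_find?_filterMap g (fun t => t.1 == k) di]
    congr 1
    exact fci_find?_congr di _ _ (fun nv _ => fciG_pred cn hint k nv)
  cases h0 : di.find? (fun nv => nv.1 == cn) with
  | some nv =>
    -- exact hit: rank 0 wins
    have hnv : nv.1 = cn := by simpa using List.find?_some h0
    have hp0 : di.find? (fun nv => ((fciRank cn (PySem.Str.lower cn) hint nv).map (fun r => r == 0)).getD false)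
        = some nv := by
      rw [← h0]
      apply fci_find?_congr
      intro x _
      by_cases hx : x.1 = cn
      · rw [fciRank_exact cn hint x hx]; simp [hx]
      · cases hr : fciRank cn (PySem.Str.lower cn) hint x with
        | none => simp [beq_false_of_ne hx]
        | some r => simp [fciRank_ne0 cn _ hint x r (beq_false_of_ne hx) hr, beq_false_of_ne hx]
    have hg0 : g nv = some (0, nv.2) := by
      rw [hg]; unfold fciG; rw [fciRank_exact cn hint nv hnv]; rfl
    rw [fciCasc, hfm 0, hp0]
    simp [hg0]
  | none =>
    have hne : ∀ x ∈ di, (x.1 == cn) = false := by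
      intro x hx
      simpa using List.find?_eq_none.mp h0 x hx
    -- no exact match: rank 0 never occurs
    have hp0 : di.find? (fun nv => ((fciRank cn (PySem.Str.lower cn) hint nv).map (fun r => r == 0)).getD false) = none := by
      rw [List.find?_eq_none]
      intro x hx
      cases hr : fciRank cn (PySem.Str.lower cn) hint x with
      | none => simp
      | some r => simp [fciRank_ne0 cn _ hint x r (hne x hx) hr]
    cases h1 : di.find? (fun nv => PySem.Str.lower nv.1 == PySem.Str.lower cn) with
    | some nv =>
      have hnv : PySem.Str.lower nv.1 = PySem.Str.lower cn := by
        simpa using List.find?_some h1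
      have hmem : nv ∈ di := List.mem_of_find?_eq_some h1
      have hp1 : di.find? (fun nv => ((fciRank cn (PySem.Str.lower cn) hint nv).map (fun r => r == 1)).getD false)
          = some nv := by
        rw [← h1]
        apply fci_find?_congr
        intro x hx
        by_cases hci : PySem.Str.lower x.1 = PySem.Str.lower cn
        · rw [fciRank_ci cn hint x (hne x hx) hci]; simp [hci]
        · have hcib : (PySem.Str.lower x.1 == PySem.Str.lower cn) = false := beq_false_of_ne hci
          cases hr : fciRank cn (PySem.Str.lower cn) hint x with
          | none => simp [hcib]
          | some r => simp [fciRank_ne1 cn _ hint x r hcib hr, hcib]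
      have hg1 : g nv = some (1, nv.2) := by
        rw [hg]; unfold fciG; rw [fciRank_ci cn hint nv (hne nv hmem) hnv]; rfl
      rw [fciCasc, hfm 0, hp0, hfm 1, hp1]
      simp [hg1]
    | none =>
      have hnci : ∀ x ∈ di, (PySem.Str.lower x.1 == PySem.Str.lower cn) = false := by
        intro x hx
        simpa using List.find?_eq_none.mp h1 x hx
      have hp1 : di.find? (fun nv => ((fciRank cn (PySem.Str.lower cn) hint nv).map (fun r => r == 1)).getD false) = none := by
        rw [List.find?_eq_none]
        intro x hx
        cases hr : fciRank cn (PySem.Str.lower cn) hint x with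
        | none => simp
        | some r => simp [fciRank_ne1 cn _ hint x r (hnci x hx) hr]
      -- only the partial-match world remains
      simp only [PySem.List.foldl_append_if_eq_filter, List.nil_append]
      rw [fciCasc, hfm 0, hp0, hfm 1, hp1, hfm 2, hfm 3]
      have hpartial_rank : ∀ x ∈ di,
          PySem.Str.isIn (PySem.Str.lower cn) (PySem.Str.lower x.1) = true →
          fciRank cn (PySem.Str.lower cn) hint x
            = some (match hint with
                    | some h' => if PySem.Str.isIn h' (PySem.Str.lower x.2) then 2 else 3
                    | none => 3) := by
        intro x hx hp
        exact fciRank_partial cn hint x (hne x hx) (hnci x hx) hp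
      cases hch : ch with
      | none =>
        have hhn : hint = none := by rw [hhint, hch]; rfl
        have hp2 : di.find? (fun nv => ((fciRank cn (PySem.Str.lower cn) hint nv).map (fun r => r == 2)).getD false) = none := by
          rw [List.find?_eq_none]
          intro x hx
          cases hp : PySem.Str.isIn (PySem.Str.lower cn) (PySem.Str.lower x.1) with
          | false => simp [fciRank_nonpartial cn hint x hp]
          | true => rw [hpartial_rank x hx hp, hhn]; simp
        have hp3 : di.find? (fun nv => ((fciRank cn (PySem.Str.lower cn) hint nv).map (fun r => r == 3)).getD false)
            = di.find? (fun nv => PySem.Str.isIn (PySem.Str.lower cn) (PySem.Str.lower nv.1)) := by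
          apply fci_find?_congr
          intro x hx
          cases hp : PySem.Str.isIn (PySem.Str.lower cn) (PySem.Str.lower x.1) with
          | false => simp [fciRank_nonpartial cn hint x hp, hp]
          | true => rw [hpartial_rank x hx hp, hhn]; simp [hp]
        rw [hp2, hp3]
        cases hf : di.filter (fun nv => PySem.Str.isIn (PySem.Str.lower cn) (PySem.Str.lower nv.1)) with
        | nil =>
          have hfind : di.find? (fun nv => PySem.Str.isIn (PySem.Str.lower cn) (PySem.Str.lower nv.1)) = none := by
            rw [← fci_head?_filter, hf]; rfl
          rw [hfind]; rfl
        | cons nv0 rest =>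
          have hfind : di.find? (fun nv => PySem.Str.isIn (PySem.Str.lower cn) (PySem.Str.lower nv.1)) = some nv0 := by
            rw [← fci_head?_filter, hf]; rfl
          have hmem0 : nv0 ∈ di := by
            have : nv0 ∈ di.filter (fun nv => PySem.Str.isIn (PySem.Str.lower cn) (PySem.Str.lower nv.1)) := by
              rw [hf]; simp
            exact List.mem_of_mem_filter this
          have hp0' : PySem.Str.isIn (PySem.Str.lower cn) (PySem.Str.lower nv0.1) = true := by
            simpa using List.find?_some hfind
          have hg3 : g nv0 = some (3, nv0.2) := by
            rw [hg]; unfold fciG; rw [hpartial_rank nv0 hmem0 hp0', hhn]; rfl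
          rw [hfind]
          obtain ⟨n0, p0⟩ := nv0
          simp [hg3]
      | some h =>
        by_cases hhe : h = ""
        · -- empty hint is falsy: same as no hint
          have hhn : hint = none := by rw [hhint, hch, fciHint]; simp [hhe]
          have hp2 : di.find? (fun nv => ((fciRank cn (PySem.Str.lower cn) hint nv).map (fun r => r == 2)).getD false) = none := by
            rw [List.find?_eq_none]
            intro x hx
            cases hp : PySem.Str.isIn (PySem.Str.lower cn) (PySem.Str.lower x.1) with
            | false => simp [fciRank_nonpartial cn hint x hp]
            | true => rw [hpartial_rank x hx hp, hhn]; simp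
          have hp3 : di.find? (fun nv => ((fciRank cn (PySem.Str.lower cn) hint nv).map (fun r => r == 3)).getD false)
              = di.find? (fun nv => PySem.Str.isIn (PySem.Str.lower cn) (PySem.Str.lower nv.1)) := by
            apply fci_find?_congr
            intro x hx
            cases hp : PySem.Str.isIn (PySem.Str.lower cn) (PySem.Str.lower x.1) with
            | false => simp [fciRank_nonpartial cn hint x hp, hp]
            | true => rw [hpartial_rank x hx hp, hhn]; simp [hp]
          rw [hp2, hp3]
          cases hf : di.filter (fun nv => PySem.Str.isIn (PySem.Str.lower cn) (PySem.Str.lower nv.1)) with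
          | nil =>
            have hfind : di.find? (fun nv => PySem.Str.isIn (PySem.Str.lower cn) (PySem.Str.lower nv.1)) = none := by
              rw [← fci_head?_filter, hf]; rfl
            rw [hfind]; rfl
          | cons nv0 rest =>
            have hfind : di.find? (fun nv => PySem.Str.isIn (PySem.Str.lower cn) (PySem.Str.lower nv.1)) = some nv0 := by
              rw [← fci_head?_filter, hf]; rfl
            have hmem0 : nv0 ∈ di := by
              have : nv0 ∈ di.filter (fun nv => PySem.Str.isIn (PySem.Str.lower cn) (PySem.Str.lower nv.1)) := by
                rw [hf]; simp
              exact List.mem_of_mem_filter this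
            have hp0' : PySem.Str.isIn (PySem.Str.lower cn) (PySem.Str.lower nv0.1) = true := by
              simpa using List.find?_some hfind
            have hg3 : g nv0 = some (3, nv0.2) := by
              rw [hg]; unfold fciG; rw [hpartial_rank nv0 hmem0 hp0', hhn]; rfl
            rw [hfind]
            obtain ⟨n0, p0⟩ := nv0
            simp [hhe, hg3]
        · -- real, non-empty hint
          have hhs : hint = some (PySem.Str.lower h) := by
            rw [hhint, hch, fciHint]; simp [hhe]
          have hpr : ∀ x ∈ di, PySem.Str.isIn (PySem.Str.lower cn) (PySem.Str.lower x.1) = true →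
              fciRank cn (PySem.Str.lower cn) hint x
                = some (if PySem.Str.isIn (PySem.Str.lower h) (PySem.Str.lower x.2) then 2 else 3) := by
            intro x hx hp
            rw [hpartial_rank x hx hp, hhs]
          have hfq : (di.filter (fun nv => PySem.Str.isIn (PySem.Str.lower cn) (PySem.Str.lower nv.1))).find?
                (fun nv => PySem.Str.isIn (PySem.Str.lower h) (PySem.Str.lower nv.2))
              = di.find? (fun nv => PySem.Str.isIn (PySem.Str.lower cn) (PySem.Str.lower nv.1)
                  && PySem.Str.isIn (PySem.Str.lower h) (PySem.Str.lower nv.2)) := fci_find?_filter _ _ _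
          cases hq : di.find? (fun nv => PySem.Str.isIn (PySem.Str.lower cn) (PySem.Str.lower nv.1)
              && PySem.Str.isIn (PySem.Str.lower h) (PySem.Str.lower nv.2)) with
          | some nv =>
            have hmem : nv ∈ di := List.mem_of_find?_eq_some hq
            have hfacts := List.find?_some hq
            simp only [Bool.and_eq_true] at hfacts
            have hp2 : di.find? (fun nv => ((fciRank cn (PySem.Str.lower cn) hint nv).map (fun r => r == 2)).getD false)
                = some nv := by
              rw [← hq]
              apply fci_find?_congr
              intro x hx
              cases hp : PySem.Str.isIn (PySem.Str.lower cn) (PySem.Str.lower x.1) with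
              | false => simp [fciRank_nonpartial cn hint x hp, hp]
              | true =>
                rw [hpr x hx hp]
                cases hq2 : PySem.Str.isIn (PySem.Str.lower h) (PySem.Str.lower x.2) <;> rfl
            have hg2 : g nv = some (2, nv.2) := by
              rw [hg]; unfold fciG
              rw [hpr nv hmem hfacts.1, hfacts.2]
              rfl
            rw [hp2]
            cases hf : di.filter (fun nv => PySem.Str.isIn (PySem.Str.lower cn) (PySem.Str.lower nv.1)) with
            | nil =>
              exfalso
              have : nv ∈ di.filter (fun nv => PySem.Str.isIn (PySem.Str.lower cn) (PySem.Str.lower nv.1)) :=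
                List.mem_filter.mpr ⟨hmem, hfacts.1⟩
              rw [hf] at this
              cases this
            | cons nv0 rest =>
              obtain ⟨n0, p0⟩ := nv0
              have hfq' : List.find? (fun nv => PySem.Str.isIn (PySem.Str.lower h) (PySem.Str.lower nv.2)) ((n0, p0) :: rest) = some nv := by
                rw [← hf, hfq]; exact hq
              simp only [PySem.Str.isIn_eq, PySem.Str.toList_lower] at hfq'
              simp [hhe, hg2, hfq']
          | none =>
            have hnq : ∀ x ∈ di, (PySem.Str.isIn (PySem.Str.lower cn) (PySem.Str.lower x.1)
                && PySem.Str.isIn (PySem.Str.lower h) (PySem.Str.lower x.2)) = false := by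
              intro x hx
              simpa using List.find?_eq_none.mp hq x hx
            have hp2 : di.find? (fun nv => ((fciRank cn (PySem.Str.lower cn) hint nv).map (fun r => r == 2)).getD false) = none := by
              rw [List.find?_eq_none]
              intro x hx
              cases hp : PySem.Str.isIn (PySem.Str.lower cn) (PySem.Str.lower x.1) with
              | false => simp [fciRank_nonpartial cn hint x hp]
              | true =>
                rw [hpr x hx hp]
                have hb := hnq x hx
                rw [hp] at hb
                simp only [Bool.true_and] at hb
                rw [hb]
                decide
            have hp3 : di.find? (fun nv => ((fciRank cn (PySem.Str.lower cn) hint nv).map (fun r => r == 3)).getD false)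
                = di.find? (fun nv => PySem.Str.isIn (PySem.Str.lower cn) (PySem.Str.lower nv.1)) := by
              apply fci_find?_congr
              intro x hx
              cases hp : PySem.Str.isIn (PySem.Str.lower cn) (PySem.Str.lower x.1) with
              | false => simp [fciRank_nonpartial cn hint x hp, hp]
              | true =>
                rw [hpr x hx hp]
                have hb := hnq x hx
                rw [hp] at hb
                simp only [Bool.true_and] at hb
                rw [hb]
                rfl
            rw [hp2, hp3]
            cases hf : di.filter (fun nv => PySem.Str.isIn (PySem.Str.lower cn) (PySem.Str.lower nv.1)) with
            | nil =>
              have hfind : di.find? (fun nv => PySem.Str.isIn (PySem.Str.lower cn) (PySem.Str.lower nv.1)) = none := by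
                rw [← fci_head?_filter, hf]; rfl
              rw [hfind]; rfl
            | cons nv0 rest =>
              have hfind : di.find? (fun nv => PySem.Str.isIn (PySem.Str.lower cn) (PySem.Str.lower nv.1)) = some nv0 := by
                rw [← fci_head?_filter, hf]; rfl
              have hmem0 : nv0 ∈ di := by
                have : nv0 ∈ di.filter (fun nv => PySem.Str.isIn (PySem.Str.lower cn) (PySem.Str.lower nv.1)) := by
                  rw [hf]; simp
                exact List.mem_of_mem_filter this
              have hp0' : PySem.Str.isIn (PySem.Str.lower cn) (PySem.Str.lower nv0.1) = true := by
                simpa using List.find?_some hfind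
              have hg3 : g nv0 = some (3, nv0.2) := by
                rw [hg]; unfold fciG
                rw [hpr nv0 hmem0 hp0']
                have hb := hnq nv0 hmem0
                rw [hp0'] at hb
                simp only [Bool.true_and] at hb
                rw [hb]
                rfl
              rw [hfind]
              obtain ⟨n0, p0⟩ := nv0
              have hfq' : List.find? (fun nv => PySem.Str.isIn (PySem.Str.lower h) (PySem.Str.lower nv.2)) ((n0, p0) :: rest) = none := by
                rw [← hf, hfq]; exact hq
              simp only [PySem.Str.isIn_eq, PySem.Str.toList_lower] at hfq'
              simp [hhe, hg3, hfq']

-- ===== VERDICT (by name: the statement is the Claim_ definition above) =====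
theorem find_correct_import_spec : Claim_equal_find_correct_import := by
  intro cn di ch _
  exact fci_main cn di ch
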